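-- pv_equiv track=rewrite | github.com/ahmetdenizeroz/ME461_BizimBulbuller | Final_Project/ImgProc/GridDetectionFinal.py | find_cell_centers
-- ===== SOURCE A (Python) =====
-- def find_cell_centers(grid):
--     centers = []
--     labels = []
--     label_count = 1
--     for row_idx in range(len(grid) - 1):
--         num_cols_curr = len(grid[row_idx])
--         num_cols_next = len(grid[row_idx + 1])
--         max_cols = min(num_cols_curr, num_cols_next) - 1
--         for col_idx in range(max_cols):
--             x1, y1 = grid[row_idx][col_idx]
--             x2, y2 = grid[row_idx + 1][col_idx + 1]
--             cx = (x1 + x2) // 2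
--             cy = (y1 + y2) // 2
--             centers.append((cx, cy))
--             labels.append(label_count)
--             label_count += 1
--     return centers, labels
-- ===== SOURCE B (Python) =====
-- def find_cell_centers(grid):
--     centers = []
--     stack = list(reversed(grid))  # explicit stack of rows; top = first row
--     while len(stack) >= 2:
--         curr = stack.pop()
--         c = list(reversed(curr))          # consume curr front-to-back via pops
--         n = list(reversed(stack[-1][1:]))  # next row, first point dropped
--         while len(c) >= 2 and n:
--             x1, y1 = c.pop()
--             x2, y2 = n.pop()
--             centers.append(((x1 + x2) // 2, (y1 + y2) // 2))
--     return centers, [k + 1 for k in range(len(centers))]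
-- ===== Notes on version B (the rewrite author's own statement) =====
-- stated objective: alternative
-- what changed: B treats the grid as an explicit stack of rows consumed by destructive pops (each row and its successor are copied reversed and drained point by point, no index arithmetic and no running label counter), and the labels are derived afterwards as 1..len(centers).
import Mathlib
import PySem

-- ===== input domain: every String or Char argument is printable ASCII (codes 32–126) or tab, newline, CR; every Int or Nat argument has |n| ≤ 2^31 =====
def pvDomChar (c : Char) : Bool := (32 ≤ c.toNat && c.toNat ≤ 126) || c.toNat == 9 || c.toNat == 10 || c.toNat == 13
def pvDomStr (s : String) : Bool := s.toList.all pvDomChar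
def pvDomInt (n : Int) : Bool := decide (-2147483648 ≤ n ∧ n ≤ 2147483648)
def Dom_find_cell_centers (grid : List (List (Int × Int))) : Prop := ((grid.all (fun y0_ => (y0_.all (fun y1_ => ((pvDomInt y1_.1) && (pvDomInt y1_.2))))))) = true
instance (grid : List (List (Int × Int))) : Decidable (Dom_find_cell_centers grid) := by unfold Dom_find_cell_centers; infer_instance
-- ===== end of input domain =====

-- B replaces A's index-arithmetic nested for-loops with a threaded label counter by an
-- explicit stack of rows consumed by destructive pops (front-to-back via reversed copies),
-- with the labels derived afterwards from the number of centers (objective: alternative).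

-- ===== PORT A =====
-- Literal transliteration: outer loop over range(len(grid)-1), inner loop over
-- range(max_cols), threaded state (centers, labels, label_count).  The pyGetD defaults
-- are never reached: every index the Python takes is in range.
def find_cell_centers (grid : List (List (Int × Int))) : (List (Int × Int)) × List Int :=
  let st :=
    (PySem.List.pyRange 0 ((grid.length : Int) - 1) 1).foldl
      (fun (st : List (Int × Int) × List Int × Int) row_idx =>
        let curr := PySem.List.pyGetD grid row_idx []
        let nxt := PySem.List.pyGetD grid (row_idx + 1) []
        let max_cols : Int := (min curr.length nxt.length : Int) - 1
        (PySem.List.pyRange 0 max_cols 1).foldl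
          (fun (st : List (Int × Int) × List Int × Int) col_idx =>
            let p1 := PySem.List.pyGetD curr col_idx (0, 0)
            let p2 := PySem.List.pyGetD nxt (col_idx + 1) (0, 0)
            let cx := PySem.Int.floordiv (p1.1 + p2.1) 2
            let cy := PySem.Int.floordiv (p1.2 + p2.2) 2
            (st.1 ++ [(cx, cy)], st.2.1 ++ [st.2.2], st.2.2 + 1))
          st)
      ([], [], 1)
  (st.1, st.2.1)

-- ===== PORT B =====
-- inner while loop of Source B: pop the next point of each of the two reversed row copies,
-- append their midpoint, while the current row has ≥ 2 points left and the other is nonempty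
def pvInnerLoop (c n centers : List (Int × Int)) : List (Int × Int) :=
  if h : 2 ≤ c.length ∧ n ≠ [] then
    let p := c.getLast (by rcases h with ⟨h1, -⟩; cases c <;> simp_all)
    let q := n.getLast h.2
    pvInnerLoop c.dropLast n.dropLast
      (centers ++ [(PySem.Int.floordiv (p.1 + q.1) 2, PySem.Int.floordiv (p.2 + q.2) 2)])
  else centers
termination_by c.length
decreasing_by simp [List.length_dropLast]; omega

-- outer while loop of Source B: pop the current row off the stack, pair it against the row
-- now on top (with its first point dropped)
def pvOuterLoop (stack : List (List (Int × Int))) (centers : List (Int × Int)) : List (Int × Int) :=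
  if h : 2 ≤ stack.length then
    let curr := stack.getLast (by cases stack <;> simp_all)
    let stack' := stack.dropLast
    let nxt := stack'.getLast (by
      apply List.ne_nil_of_length_pos
      simp only [stack', List.length_dropLast]; omega)
    pvOuterLoop stack' (pvInnerLoop curr.reverse (PySem.List.slice nxt (some 1) none).reverse centers)
  else centers
termination_by stack.length
decreasing_by simp [List.length_dropLast]; omega

def find_cell_centers_alt (grid : List (List (Int × Int))) : (List (Int × Int)) × List Int :=
  let centers := pvOuterLoop grid.reverse []
  (centers, (PySem.List.pyRange 0 (centers.length : Int) 1).map (fun k => k + 1))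

-- ===== PRECONDITION & SPEC =====
def Spec_find_cell_centers (grid : List (List (Int × Int))) (out : (List (Int × Int)) × List Int) : Prop := out = find_cell_centers_alt grid
instance (grid : List (List (Int × Int))) (out : (List (Int × Int)) × List Int) : Decidable (Spec_find_cell_centers grid out) := by unfold Spec_find_cell_centers; infer_instance

-- ===== CLAIM (what is proved, stated in full; the proofs are below) =====
def Claim_equal_find_cell_centers : Prop := ∀ (grid : List (List (Int × Int))), Dom_find_cell_centers grid → Spec_find_cell_centers grid (find_cell_centers grid)


-- ===== LEMMAS AND PROOFS =====

-- the shared center formula (proof-only shorthand)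
def pvC (p q : Int × Int) : Int × Int :=
  (PySem.Int.floordiv (p.1 + q.1) 2, PySem.Int.floordiv (p.2 + q.2) 2)

-- the centers one adjacent row pair contributes, head-first (proof-only shorthand)
def pvPairs : List (Int × Int) → List (Int × Int) → List (Int × Int)
  | p :: c2 :: cs, q :: ns => pvC p q :: pvPairs (c2 :: cs) ns
  | _, _ => []

-- the centers of the whole grid, row pair by row pair (proof-only shorthand)
def pvWalk : List (List (Int × Int)) → List (Int × Int)
  | r1 :: r2 :: rest => pvPairs r1 r2.tail ++ pvWalk (r2 :: rest)
  | _ => []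

theorem pv_getLast_reverse_cons {α : Type} (a : α) (l : List α) (h : (a :: l).reverse ≠ []) :
    (a :: l).reverse.getLast h = a := by
  simp [List.getLast_eq_getElem]

theorem pv_dropLast_reverse_cons {α : Type} (a : α) (l : List α) :
    (a :: l).reverse.dropLast = l.reverse := by
  rw [List.reverse_cons, List.dropLast_concat]

theorem pvGetD_tail {α : Type} (xs : List α) (j : Nat) (d : α) :
    xs.tail.getD j d = xs.getD (j + 1) d := by
  cases xs <;> simp [List.getD]

-- B's inner loop, on the reversed copies, appends exactly pvPairs
theorem pvInnerLoop_eq (c : List (Int × Int)) :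
    ∀ (n acc : List (Int × Int)),
      pvInnerLoop c.reverse n.reverse acc = acc ++ pvPairs c n := by
  induction c with
  | nil => intro n acc; rw [pvInnerLoop]; simp [pvPairs]
  | cons p c ih =>
    intro n acc
    match c, n with
    | [], _ => rw [pvInnerLoop]; simp [pvPairs]
    | c2 :: cs, [] => rw [pvInnerLoop]; simp [pvPairs]
    | c2 :: cs, q :: ns =>
      rw [pvInnerLoop, dif_pos (by simp)]
      simp only [pv_getLast_reverse_cons, pv_dropLast_reverse_cons]
      rw [ih ns]
      simp [pvPairs, pvC]

-- B's outer loop on the reversed grid walks the adjacent row pairs in order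
theorem pvOuterLoop_eq (g : List (List (Int × Int))) :
    ∀ (acc : List (Int × Int)), pvOuterLoop g.reverse acc = acc ++ pvWalk g := by
  induction g with
  | nil => intro acc; rw [pvOuterLoop]; simp [pvWalk]
  | cons r1 g ih =>
    intro acc
    match g with
    | [] => rw [pvOuterLoop]; simp [pvWalk]
    | r2 :: rest =>
      rw [pvOuterLoop, dif_pos (by simp)]
      simp only [pv_getLast_reverse_cons, pv_dropLast_reverse_cons,
        PySem.List.slice_from_one]
      rw [pvInnerLoop_eq r1 r2.tail, ih]
      simp [pvWalk, List.append_assoc]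

-- pvPairs in indexed form
theorem pvPairs_eq_range (c : List (Int × Int)) :
    ∀ (ns : List (Int × Int)),
      pvPairs c ns = (List.range (min (c.length - 1) ns.length)).map
        (fun j => pvC (c.getD j (0, 0)) (ns.getD j (0, 0))) := by
  induction c with
  | nil => intro ns; simp [pvPairs]
  | cons p c ih =>
    intro ns
    match c, ns with
    | [], _ => simp [pvPairs]
    | c2 :: cs, [] => simp [pvPairs]
    | c2 :: cs, q :: ns' =>
      have hmin : min ((p :: c2 :: cs).length - 1) (q :: ns').length
          = min ((c2 :: cs).length - 1) ns'.length + 1 := by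
        simp only [List.length_cons]; omega
      rw [show pvPairs (p :: c2 :: cs) (q :: ns') = pvC p q :: pvPairs (c2 :: cs) ns' from rfl]
      rw [hmin, List.range_succ_eq_map, List.map_cons, List.map_map, ih ns']
      simp [Function.comp_def, List.getD]

-- pvRowCenters of A's indexed proof form (per-row centers; proof-only shorthand)
def pvRowCenters (curr nxt : List (Int × Int)) : List (Int × Int) :=
  (List.range (min (curr.length : Int) (nxt.length : Int) - 1).toNat).map
    (fun j => pvC (curr.getD j (0, 0)) (nxt.getD (j + 1) (0, 0)))

-- one row pair: pvPairs on (curr, nxt.tail) is exactly A's indexed row contribution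
theorem pvPairs_eq_rowCenters (curr nxt : List (Int × Int)) :
    pvPairs curr nxt.tail = pvRowCenters curr nxt := by
  rw [pvPairs_eq_range]
  unfold pvRowCenters
  have hlen : min (curr.length - 1) nxt.tail.length
      = (min (curr.length : Int) (nxt.length : Int) - 1).toNat := by
    simp only [List.length_tail]; omega
  rw [hlen]
  apply List.map_congr_left
  intro j hj
  rw [pvGetD_tail]

-- per-row centers of the grid (proof-only shorthand)
def pvRowF (g : List (List (Int × Int))) (i : Nat) : List (Int × Int) :=
  pvRowCenters (g.getD i []) (g.getD (i + 1) [])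

-- pvWalk in A's indexed flatMap form
theorem pvWalk_eq_flatMap (g : List (List (Int × Int))) :
    pvWalk g = (List.range (g.length - 1)).flatMap (pvRowF g) := by
  induction g with
  | nil => simp [pvWalk]
  | cons r1 g ih =>
    match g with
    | [] => simp [pvWalk]
    | r2 :: rest =>
      rw [show pvWalk (r1 :: r2 :: rest) = pvPairs r1 r2.tail ++ pvWalk (r2 :: rest) from rfl]
      rw [ih]
      rw [show (r1 :: r2 :: rest).length - 1 = ((r2 :: rest).length - 1) + 1 by simp]
      rw [List.range_succ_eq_map, List.flatMap_cons, List.flatMap_map]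
      congr 1
      rw [pvPairs_eq_rowCenters]
      simp [pvRowF]

-- the inner loop of A, over a Nat range
theorem pv_inner_fold (curr nxt : List (Int × Int)) (t : Nat) :
    ∀ (cs : List (Int × Int)) (ls : List Int) (k : Int),
      (List.range t).foldl
        (fun (st : List (Int × Int) × List Int × Int) (j : Nat) =>
          (st.1 ++ [(PySem.Int.floordiv ((curr.getD j (0, 0)).1 + (nxt.getD (j + 1) (0, 0)).1) 2,
                     PySem.Int.floordiv ((curr.getD j (0, 0)).2 + (nxt.getD (j + 1) (0, 0)).2) 2)],
           st.2.1 ++ [st.2.2], st.2.2 + 1))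
        (cs, ls, k)
      = (cs ++ (List.range t).map
            (fun j => pvC (curr.getD j (0, 0)) (nxt.getD (j + 1) (0, 0))),
         ls ++ (List.range t).map (fun (j : Nat) => k + (j : Int)), k + t) := by
  induction t with
  | zero => intro cs ls k; simp
  | succ t ih =>
    intro cs ls k
    rw [List.range_succ, List.foldl_append, ih]
    simp only [List.foldl_cons, List.foldl_nil, List.map_append, List.map_cons, List.map_nil]
    refine Prod.ext ?_ (Prod.ext ?_ ?_)
    · simp [pvC, List.append_assoc]
    · simp [List.append_assoc]
    · push_cast; ring

theorem pv_map_range_shift (k : Int) (a b : Nat) :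
    (List.range a).map (fun (j : Nat) => k + (j : Int)) ++
      (List.range b).map (fun (j : Nat) => k + (a : Int) + (j : Int))
    = (List.range (a + b)).map (fun (j : Nat) => k + (j : Int)) := by
  rw [List.range_add, List.map_append, List.map_map]
  congr 1
  apply List.map_congr_left
  intro j hj
  simp only [Function.comp_apply]
  push_cast; ring

-- the outer loop of A, over a Nat range
theorem pv_outer_fold (g : List (List (Int × Int))) (t : Nat) :
    ∀ (cs : List (Int × Int)) (ls : List Int) (k : Int),
      (List.range t).foldl
        (fun (st : List (Int × Int) × List Int × Int) (i : Nat) =>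
          (List.range (min ((g.getD i []).length : Int) ((g.getD (i + 1) []).length : Int) - 1).toNat).foldl
            (fun (st : List (Int × Int) × List Int × Int) (j : Nat) =>
              (st.1 ++ [(PySem.Int.floordiv (((g.getD i []).getD j (0, 0)).1 + ((g.getD (i + 1) []).getD (j + 1) (0, 0)).1) 2,
                         PySem.Int.floordiv (((g.getD i []).getD j (0, 0)).2 + ((g.getD (i + 1) []).getD (j + 1) (0, 0)).2) 2)],
               st.2.1 ++ [st.2.2], st.2.2 + 1))
            st)
        (cs, ls, k)
      = (cs ++ (List.range t).flatMap (pvRowF g),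
         ls ++ (List.range ((List.range t).flatMap (pvRowF g)).length).map (fun (j : Nat) => k + (j : Int)),
         k + ((List.range t).flatMap (pvRowF g)).length) := by
  induction t with
  | zero => intro cs ls k; simp
  | succ t ih =>
    intro cs ls k
    rw [List.range_succ, List.foldl_append, ih]
    simp only [List.foldl_cons, List.foldl_nil]
    rw [pv_inner_fold]
    have hrow : pvRowF g t =
        (List.range (min ((g.getD t []).length : Int) ((g.getD (t + 1) []).length : Int) - 1).toNat).map
          (fun j => pvC ((g.getD t []).getD j (0, 0)) ((g.getD (t + 1) []).getD (j + 1) (0, 0))) := rfl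
    rw [← hrow]
    have hflat : (List.range t ++ [t]).flatMap (pvRowF g)
        = (List.range t).flatMap (pvRowF g) ++ pvRowF g t := by
      rw [List.flatMap_append]; simp
    have hlen2 : ((List.range t ++ [t]).flatMap (pvRowF g)).length
        = ((List.range t).flatMap (pvRowF g)).length
          + (min ((g.getD t []).length : Int) ((g.getD (t + 1) []).length : Int) - 1).toNat := by
      rw [hflat, List.length_append, hrow, List.length_map, List.length_range]
    refine Prod.ext ?_ (Prod.ext ?_ ?_)
    · simp [hflat, List.append_assoc]
    · rw [hlen2, ← pv_map_range_shift]; simp [List.append_assoc]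
    · dsimp only; rw [hlen2]; push_cast; ring

-- pyGetD at a cast index plus one
theorem pvGetD_cast_succ {α : Type} (xs : List α) (k : Nat) (d : α) :
    PySem.List.pyGetD xs ((k : Int) + 1) d = xs.getD (k + 1) d := by
  rw [show ((k : Int) + 1) = ((k + 1 : Nat) : Int) by push_cast; ring, PySem.List.pyGetD_natCast]

theorem pv_A_eq (grid : List (List (Int × Int))) :
    find_cell_centers grid
      = ((List.range (grid.length - 1)).flatMap (pvRowF grid),
         (List.range ((List.range (grid.length - 1)).flatMap (pvRowF grid)).length).map
           (fun (j : Nat) => (1 : Int) + (j : Int))) := by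
  unfold find_cell_centers
  simp only [PySem.List.pyRange_one, List.foldl_map, zero_add, sub_zero,
    PySem.List.pyGetD_natCast, pvGetD_cast_succ]
  rw [pv_outer_fold]
  rw [show ((grid.length : Int) - 1).toNat = grid.length - 1 by omega]
  simp

theorem pv_B_eq (grid : List (List (Int × Int))) :
    find_cell_centers_alt grid
      = ((List.range (grid.length - 1)).flatMap (pvRowF grid),
         (List.range ((List.range (grid.length - 1)).flatMap (pvRowF grid)).length).map
           (fun (j : Nat) => (1 : Int) + (j : Int))) := by
  unfold find_cell_centers_alt
  have hc : pvOuterLoop grid.reverse [] = (List.range (grid.length - 1)).flatMap (pvRowF grid) := by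
    rw [pvOuterLoop_eq, pvWalk_eq_flatMap]; rfl
  rw [hc]
  simp only [PySem.List.pyRange_one, sub_zero, Int.toNat_natCast, List.map_map]
  refine Prod.ext rfl ?_
  apply List.map_congr_left
  intro j hj
  simp only [Function.comp_apply]
  ring

-- ===== VERDICT (by name: the statement is the Claim_ definition above) =====
theorem find_cell_centers_spec : Claim_equal_find_cell_centers := by
  intro grid _
  show find_cell_centers grid = find_cell_centers_alt grid
  rw [pv_A_eq, pv_B_eq]
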